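-- pv_equiv track=rewrite | github.com/pawamoy/aria2p | src/aria2p/api.py | split_input_file
-- ===== SOURCE A (Python) =====
-- from typing import Callable, Dict, Iterator, List, TextIO, Tuple, Union, Coroutine
--
-- def split_input_file(lines: list[str] | TextIO) -> Iterator[list[str]]:
--     """Helper to split downloads in an input file.
--
--     Parameters:
--          lines: The lines of the input file.
--
--     Yields:
--         list[str]: Blocks of lines.
--     """
--     block: list[str] = []
--     for line in lines:
--         if line.lstrip().startswith("#"):  # Ignore Comments
--             continue
--         if not line.strip():  # Ignore empty line
--             continue
--         if not line.startswith(" ") and block:  # URIs line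
--             yield block
--             block = []
--         block.append(line.rstrip("\n"))
--     if block:
--         yield block
-- ===== SOURCE B (Python) =====
-- def split_input_file(lines):
--     """Two-pass version: first filter the lines, then group the prepared entries."""
--     prepared = []
--     for line in lines:
--         if line.lstrip().startswith("#"):  # Ignore comments
--             continue
--         if not line.strip():  # Ignore empty lines
--             continue
--         prepared.append((line.rstrip("\n"), line.startswith(" ")))
--     block = []
--     for text, indented in prepared:
--         if not indented and block:
--             yield block
--             block = [text]
--         else:
--             block.append(text)
--     if block:
--         yield block
-- ===== Notes on version B (the rewrite author's own statement) =====
-- stated objective: alternative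
-- what changed: Replaces A's single interleaved scan by two passes: a filtering pass that keeps (rstripped text, indented flag) for every non-comment non-blank line, followed by a separately-shaped grouping pass over that prepared sequence that cuts a block before each non-indented entry.
import Mathlib
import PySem

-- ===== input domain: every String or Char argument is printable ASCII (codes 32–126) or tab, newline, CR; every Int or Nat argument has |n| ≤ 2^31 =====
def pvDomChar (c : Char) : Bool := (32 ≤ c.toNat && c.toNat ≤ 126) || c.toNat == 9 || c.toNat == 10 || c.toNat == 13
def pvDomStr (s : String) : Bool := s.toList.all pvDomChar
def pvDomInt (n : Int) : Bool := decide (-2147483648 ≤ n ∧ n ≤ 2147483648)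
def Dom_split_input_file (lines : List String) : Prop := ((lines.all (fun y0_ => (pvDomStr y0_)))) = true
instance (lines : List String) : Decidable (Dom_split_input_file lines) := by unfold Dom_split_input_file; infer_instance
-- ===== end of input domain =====

-- B restructures A's single interleaved scan into a filter pass followed by a grouping pass (alternative decomposition, same cost).
-- Both versions consume the iterable of lines without mutating it; equivalence is about the yielded sequence of blocks.

-- hand port of s.rstrip("\n") (exact: removes exactly the trailing '\n' characters; PySem has no one-sided strip-with-chars)
def rstripNl (s : String) : String :=
  String.ofList ((s.toList.reverse.dropWhile (· == '\n')).reverse)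

-- ===== PORT A =====
def splitLoopA : List String → List String → List (List String)
  | [], block => if block.isEmpty then [] else [block]
  | line :: rest, block =>
    if PySem.Str.startswith (PySem.Str.lstrip line) "#" then splitLoopA rest block
    else if PySem.Str.strip line = "" then splitLoopA rest block
    else if !(PySem.Str.startswith line " ") && !block.isEmpty then
      block :: splitLoopA rest ([] ++ [rstripNl line])
    else splitLoopA rest (block ++ [rstripNl line])

def split_input_file (lines : List String) : List (List String) := splitLoopA lines []

-- ===== PORT B =====
def prepareB (ls : List String) : List (String × Bool) :=
  ls.filterMap (fun line =>
    if PySem.Str.startswith (PySem.Str.lstrip line) "#" then none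
    else if PySem.Str.strip line = "" then none
    else some (rstripNl line, PySem.Str.startswith line " "))

def groupB : List (String × Bool) → List String → List (List String)
  | [], block => if block.isEmpty then [] else [block]
  | (t, ind) :: rest, block =>
    if !ind && !block.isEmpty then block :: groupB rest [t]
    else groupB rest (block ++ [t])

def split_input_file_alt (lines : List String) : List (List String) := groupB (prepareB lines) []

-- ===== PRECONDITION & SPEC =====
def Spec_split_input_file (lines : List String) (out : List (List String)) : Prop := out = split_input_file_alt lines
instance (lines : List String) (out : List (List String)) : Decidable (Spec_split_input_file lines out) := by unfold Spec_split_input_file; infer_instance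

-- ===== CLAIM (what is proved, stated in full; the proofs are below) =====
def Claim_equal_split_input_file : Prop := ∀ (lines : List String), Dom_split_input_file lines → Spec_split_input_file lines (split_input_file lines)

-- ===== LEMMAS AND PROOFS =====
theorem splitLoopA_eq_groupB (ls : List String) :
    ∀ block, splitLoopA ls block = groupB (prepareB ls) block := by
  induction ls with
  | nil => intro block; rfl
  | cons line rest ih =>
    intro block
    simp only [splitLoopA, prepareB, List.filterMap_cons]
    split_ifs with h1 h2 h3
    · exact ih block
    · exact ih block
    · simp only [groupB, h3, if_true, List.nil_append]
      exact congrArg _ (ih _)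
    · simp only [groupB, h3, if_false]
      exact ih _

-- ===== VERDICT (by name: the statement is the Claim_ definition above) =====
theorem split_input_file_spec : Claim_equal_split_input_file := by
  intro lines _
  unfold Spec_split_input_file split_input_file split_input_file_alt
  exact splitLoopA_eq_groupB lines []
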